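-- pv_equiv track=rewrite | github.com/kdfkjlk/TARGET | QA/gen_env_qs.py | gen_qs_time_or_weather
-- ===== SOURCE A (Python) =====
-- def gen_question(question):
--     ##return f"Based on the description, \"{rule}\", {question}?, answer with yes or no."
--     return f"{question}"
--
-- def gen_multi_time_q(item_list):
--     """
--     rule: the input traffic rule
--     item_list: e.g., ['daytime', 'brightness of the sky']
--     return: a list of all the questions
--     """
--     return [
--         gen_question(f"is {item_list[0]} mentioned"),
--         gen_question(f"is {item_list[0]} explicitly mentioned"),
--         gen_question(f"is it {item_list[0]} now"),
--         gen_question(f"is there any mention of {item_list[0]}"),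
--         gen_question(f"is {item_list[1]} explicitly mentioned")
--     ]
--
-- def gen_multi_pre_weather_q(item_list):
--     return [
--         gen_question(f"is {item_list[0]} mentioned"),
--         gen_question(f"is {item_list[0]} explicitly mentioned"),
--         gen_question(f"is {item_list[1]} mentioned"),
--         gen_question(f"is {item_list[1]} explicitly mentioned"),
--         gen_question(f"is there any mention of {item_list[1]}"),
--     ]
--
-- def gen_multi_weather_q(item_list):
--     return [
--         gen_question(f"is it {item_list[0]}"),
--         gen_question(f"is it {item_list[1]} now"),
--         gen_question(f"is {item_list[2]} mentioned"),
--         gen_question(f"is {item_list[2]} explicitly mentioned"),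
--         gen_question(f"is it in {item_list[2]}"),
--     ]
--
-- def gen_qs_time_or_weather(keys=['time', 'pre_weather', 'weather']):
--     """ time and weather Questions
--     keys = ['time', 'pre_weather', 'weather']
--     output: [['.. mentioned', '... mentioned', ...5 questions], [5 questions], ...] """
--
--     all_questions_temp=[]
--
--     if 'time' in keys:
--         keys_time = [['daytime', 'brightness of the sky'], ['nighttime', 'darkness']]
--         for time_item in keys_time:
--             all_ans_temp = gen_multi_time_q(time_item)
--             all_questions_temp.append(all_ans_temp)
--
--     if 'pre_weather' in keys:
--         keys_pre_weather = [['weather', 'weather condition']]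
--         for pre_weather_item in keys_pre_weather:
--             all_ans_temp = gen_multi_pre_weather_q(pre_weather_item)
--             all_questions_temp.append(all_ans_temp)
--
--     if 'weather' in keys:
--         keys_weather = [['sunny', 'sunny', 'sunny weather'], ['rainy', 'raining', 'rainy weather'],
--                         ['snowy', 'snowying', 'snowy weather'], ['foggy', 'foggy', 'foggy weather']]
--         for weather_item in keys_weather:
--             all_ans_temp = gen_multi_weather_q(weather_item)
--             all_questions_temp.append(all_ans_temp)
--
--     return all_questions_temp
-- ===== SOURCE B (Python) =====
-- # Data-driven rewrite: one config table (key, item groups, one-placeholder templates),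
-- # a single generic pass replaces the three helper functions and hardcoded branches.
-- _CONFIG = [
--     ('time',
--      [['daytime', 'brightness of the sky'], ['nighttime', 'darkness']],
--      [('is ', 0, ' mentioned'),
--       ('is ', 0, ' explicitly mentioned'),
--       ('is it ', 0, ' now'),
--       ('is there any mention of ', 0, ''),
--       ('is ', 1, ' explicitly mentioned')]),
--     ('pre_weather',
--      [['weather', 'weather condition']],
--      [('is ', 0, ' mentioned'),
--       ('is ', 0, ' explicitly mentioned'),
--       ('is ', 1, ' mentioned'),
--       ('is ', 1, ' explicitly mentioned'),
--       ('is there any mention of ', 1, '')]),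
--     ('weather',
--      [['sunny', 'sunny', 'sunny weather'], ['rainy', 'raining', 'rainy weather'],
--       ['snowy', 'snowying', 'snowy weather'], ['foggy', 'foggy', 'foggy weather']],
--      [('is it ', 0, ''),
--       ('is it ', 1, ' now'),
--       ('is ', 2, ' mentioned'),
--       ('is ', 2, ' explicitly mentioned'),
--       ('is it in ', 2, '')]),
-- ]
--
-- def gen_qs_time_or_weather(keys=['time', 'pre_weather', 'weather']):
--     return [[pre + group[i] + post for (pre, i, post) in templates]
--             for (key, groups, templates) in _CONFIG
--             if key in keys
--             for group in groups]
-- ===== Notes on version B (the rewrite author's own statement) =====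
-- stated objective: idiomatic
-- what changed: Replaced the three per-category helper functions and hardcoded if/for blocks with a single config table of (key, item groups, one-placeholder templates) traversed by one generic data-driven comprehension.
import Mathlib
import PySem

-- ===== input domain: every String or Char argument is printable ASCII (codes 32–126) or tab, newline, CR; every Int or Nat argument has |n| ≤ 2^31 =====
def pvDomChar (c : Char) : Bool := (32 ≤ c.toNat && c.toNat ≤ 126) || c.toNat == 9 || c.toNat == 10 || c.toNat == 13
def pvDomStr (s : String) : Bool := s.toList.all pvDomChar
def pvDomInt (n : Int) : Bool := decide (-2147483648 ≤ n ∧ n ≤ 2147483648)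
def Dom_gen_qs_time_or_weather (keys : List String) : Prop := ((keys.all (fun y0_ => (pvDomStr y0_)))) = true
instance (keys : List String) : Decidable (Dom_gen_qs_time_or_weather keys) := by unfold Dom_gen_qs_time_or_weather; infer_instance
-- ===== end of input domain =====

-- B replaces A's three helper functions and hardcoded branches with one config table driven by a single generic pass (idiomatic, same cost).


-- ===== PORT A =====
def gen_question (question : String) : String := question

-- item_list indexing: A only calls these helpers with the fixed literal lists below,
-- so every index is in range; pyGet?.getD "" is exact there.
def pvIdx (l : List String) (i : Int) : String := (PySem.List.pyGet? l i).getD ""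

def gen_multi_time_q (item_list : List String) : List String :=
  [gen_question ("is " ++ pvIdx item_list 0 ++ " mentioned"),
   gen_question ("is " ++ pvIdx item_list 0 ++ " explicitly mentioned"),
   gen_question ("is it " ++ pvIdx item_list 0 ++ " now"),
   gen_question ("is there any mention of " ++ pvIdx item_list 0),
   gen_question ("is " ++ pvIdx item_list 1 ++ " explicitly mentioned")]

def gen_multi_pre_weather_q (item_list : List String) : List String :=
  [gen_question ("is " ++ pvIdx item_list 0 ++ " mentioned"),
   gen_question ("is " ++ pvIdx item_list 0 ++ " explicitly mentioned"),
   gen_question ("is " ++ pvIdx item_list 1 ++ " mentioned"),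
   gen_question ("is " ++ pvIdx item_list 1 ++ " explicitly mentioned"),
   gen_question ("is there any mention of " ++ pvIdx item_list 1)]

def gen_multi_weather_q (item_list : List String) : List String :=
  [gen_question ("is it " ++ pvIdx item_list 0),
   gen_question ("is it " ++ pvIdx item_list 1 ++ " now"),
   gen_question ("is " ++ pvIdx item_list 2 ++ " mentioned"),
   gen_question ("is " ++ pvIdx item_list 2 ++ " explicitly mentioned"),
   gen_question ("is it in " ++ pvIdx item_list 2)]

def gen_qs_time_or_weather (keys : List String) : List (List String) :=
  let q0 : List (List String) := []
  let q1 :=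
    if keys.contains "time" then
      [["daytime", "brightness of the sky"], ["nighttime", "darkness"]].foldl
        (fun acc time_item => acc ++ [gen_multi_time_q time_item]) q0
    else q0
  let q2 :=
    if keys.contains "pre_weather" then
      [["weather", "weather condition"]].foldl
        (fun acc pre_weather_item => acc ++ [gen_multi_pre_weather_q pre_weather_item]) q1
    else q1
  let q3 :=
    if keys.contains "weather" then
      [["sunny", "sunny", "sunny weather"], ["rainy", "raining", "rainy weather"],
       ["snowy", "snowying", "snowy weather"], ["foggy", "foggy", "foggy weather"]].foldl
        (fun acc weather_item => acc ++ [gen_multi_weather_q weather_item]) q2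
    else q2
  q3

-- ===== PORT B =====
-- one config table: (key name, item groups, one-placeholder templates (prefix, index, suffix))
def pvConfig : List (String × List (List String) × List (String × Int × String)) :=
  [("time",
    [["daytime", "brightness of the sky"], ["nighttime", "darkness"]],
    [("is ", 0, " mentioned"),
     ("is ", 0, " explicitly mentioned"),
     ("is it ", 0, " now"),
     ("is there any mention of ", 0, ""),
     ("is ", 1, " explicitly mentioned")]),
   ("pre_weather",
    [["weather", "weather condition"]],
    [("is ", 0, " mentioned"),
     ("is ", 0, " explicitly mentioned"),
     ("is ", 1, " mentioned"),
     ("is ", 1, " explicitly mentioned"),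
     ("is there any mention of ", 1, "")]),
   ("weather",
    [["sunny", "sunny", "sunny weather"], ["rainy", "raining", "rainy weather"],
     ["snowy", "snowying", "snowy weather"], ["foggy", "foggy", "foggy weather"]],
    [("is it ", 0, ""),
     ("is it ", 1, " now"),
     ("is ", 2, " mentioned"),
     ("is ", 2, " explicitly mentioned"),
     ("is it in ", 2, "")])]

def gen_qs_time_or_weather_alt (keys : List String) : List (List String) :=
  pvConfig.flatMap (fun entry =>
    if keys.contains entry.1 then
      entry.2.1.map (fun group =>
        entry.2.2.map (fun t => t.1 ++ (PySem.List.pyGet? group t.2.1).getD "" ++ t.2.2))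
    else [])

-- ===== PRECONDITION & SPEC =====
def Spec_gen_qs_time_or_weather (keys : List String) (out : List (List String)) : Prop := out = gen_qs_time_or_weather_alt keys
instance (keys : List String) (out : List (List String)) : Decidable (Spec_gen_qs_time_or_weather keys out) := by unfold Spec_gen_qs_time_or_weather; infer_instance

-- ===== CLAIM (what is proved, stated in full; the proofs are below) =====
def Claim_equal_gen_qs_time_or_weather : Prop := ∀ (keys : List String), Dom_gen_qs_time_or_weather keys → Spec_gen_qs_time_or_weather keys (gen_qs_time_or_weather keys)

-- ===== LEMMAS AND PROOFS =====

-- ===== VERDICT (by name: the statement is the Claim_ definition above) =====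
theorem gen_qs_time_or_weather_spec : Claim_equal_gen_qs_time_or_weather := by
  intro keys _
  unfold Spec_gen_qs_time_or_weather gen_qs_time_or_weather gen_qs_time_or_weather_alt
  cases h1 : keys.contains "time" <;> cases h2 : keys.contains "pre_weather" <;>
    cases h3 : keys.contains "weather" <;>
      simp only [List.contains_eq_mem, decide_eq_true_eq, decide_eq_false_iff_not] at h1 h2 h3 <;>
      simp [h1, h2, h3, pvConfig, gen_multi_time_q, gen_multi_pre_weather_q,
            gen_multi_weather_q, gen_question, pvIdx]
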